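-- pv_equiv track=rewrite | github.com/steel-experiments/oss-ai-stack-map | src/oss_ai_stack_map/pipeline/reporting.py | build_vendor_terms
-- ===== SOURCE A (Python) =====
-- from typing import Any
--
-- def build_vendor_terms(technologies: list[dict[str, Any]]) -> set[str]:
--     terms: set[str] = set()
--     stopwords = {
--         "ai",
--         "sdk",
--         "agent",
--         "agents",
--         "browser",
--         "use",
--         "tool",
--         "tools",
--         "runtime",
--         "open",
--         "source",
--     }
--     for row in technologies:
--         for repo_name in row.get("repo_names", []) or []:
--             owner, _, repo = repo_name.casefold().partition("/")
--             for candidate in (owner, repo):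
--                 for token in split_vendor_tokens(candidate):
--                     if len(token) >= 4 and token not in stopwords:
--                         terms.add(token)
--         for alias in row.get("aliases", []) or []:
--             for token in split_vendor_tokens(alias):
--                 if len(token) >= 4 and token not in stopwords:
--                     terms.add(token)
--     return terms
--
-- def split_vendor_tokens(value: str) -> list[str]:
--     cleaned = (
--         value.casefold()
--         .replace("@", " ")
--         .replace("/", " ")
--         .replace("-", " ")
--         .replace("_", " ")
--         .replace(".", " ")
--     )
--     return [token for token in cleaned.split() if token]
-- ===== SOURCE B (Python) =====
-- from typing import Any
--
--
-- def build_vendor_terms(technologies: list[dict[str, Any]]) -> set[str]: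
--     # Character-level streaming scanner: instead of rewriting each string with a
--     # chain of replace() calls, partitioning and splitting, walk the casefolded
--     # characters once, cutting a token at every separator and keeping it only if
--     # it is long enough and not a stopword.
--     stopwords = frozenset({
--         "ai", "sdk", "agent", "agents", "browser", "use", "tool", "tools",
--         "runtime", "open", "source",
--     })
--     separators = frozenset("@/-_.")
--     terms: set[str] = set()
--     for row in technologies:
--         for text in list(row.get("repo_names", []) or []) + list(row.get("aliases", []) or []):
--             token = ""
--             for ch in text.casefold() + " ":
--                 if ch in separators or ch.isspace():
--                     if len(token) >= 4 and token not in stopwords: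
--                         terms.add(token)
--                     token = ""
--                 else:
--                     token += ch
--     return terms
-- ===== Notes on version B (the rewrite author's own statement) =====
-- stated objective: alternative
-- what changed: B replaces A's multi-pass string-rewriting pipeline (casefold, five replace() passes, owner/repo partition, split(), per-token filter) with a single character-level streaming scanner that walks each candidate string once, cutting a token at every separator/whitespace character and filtering it at emission.
import Mathlib
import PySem

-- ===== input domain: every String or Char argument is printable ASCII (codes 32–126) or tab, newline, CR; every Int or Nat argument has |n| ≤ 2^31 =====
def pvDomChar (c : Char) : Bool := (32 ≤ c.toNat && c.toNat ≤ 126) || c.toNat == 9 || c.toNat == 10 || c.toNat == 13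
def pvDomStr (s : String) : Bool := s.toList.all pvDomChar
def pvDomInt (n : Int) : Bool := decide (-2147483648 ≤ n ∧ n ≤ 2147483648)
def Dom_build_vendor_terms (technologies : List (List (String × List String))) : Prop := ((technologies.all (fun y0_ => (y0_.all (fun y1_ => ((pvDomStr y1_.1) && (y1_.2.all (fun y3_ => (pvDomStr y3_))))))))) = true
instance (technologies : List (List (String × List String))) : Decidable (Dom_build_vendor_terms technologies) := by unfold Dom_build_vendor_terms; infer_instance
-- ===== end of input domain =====

-- B replaces A's rewrite pipeline (casefold + five replace passes + owner/repo partition + split)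
-- with a character-level scanner that cuts tokens at separators; objective: alternative.


-- ===== PORT A =====
-- shared module helper split_vendor_tokens (casefold = Str.lower: exact on the ASCII domain)
def split_vendor_tokens (value : String) : List String :=
  let cleaned :=
    PySem.Str.replace (PySem.Str.replace (PySem.Str.replace (PySem.Str.replace
      (PySem.Str.replace (PySem.Str.lower value) "@" " ") "/" " ") "-" " ") "_" " ") "." " "
  (PySem.Str.split₀ cleaned).filter (fun token => token ≠ "")

-- hand port of str.partition("/"): (part before first '/', part after it); no '/' → (s, "")
-- exact: Python's owner/repo components of repo_name.partition("/") (the middle "/" is discarded by A)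
def pvPartitionSlash (s : List Char) : List Char × List Char :=
  match s with
  | [] => ([], [])
  | c :: t => if c = '/' then ([], t) else
      let p := pvPartitionSlash t
      (c :: p.1, p.2)

def build_vendor_terms (technologies : List (List (String × List String))) : List String :=
  let stopwords : PySem.Set String := PySem.Set.ofList
    ["ai", "sdk", "agent", "agents", "browser", "use", "tool", "tools", "runtime", "open", "source"]
  technologies.foldl (fun terms row =>
    let terms := (PySem.Dict.getD ⟨row⟩ "repo_names" []).foldl (fun terms repo_name =>
      let p := pvPartitionSlash (PySem.Str.lower repo_name).toList
      [String.ofList p.1, String.ofList p.2].foldl (fun terms candidate =>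
        (split_vendor_tokens candidate).foldl (fun terms token =>
          if decide (4 ≤ PySem.Str.len token) && ! PySem.Set.contains stopwords token then
            PySem.Set.add terms token
          else terms) terms) terms) terms
    (PySem.Dict.getD ⟨row⟩ "aliases" []).foldl (fun terms alias_ =>
      (split_vendor_tokens alias_).foldl (fun terms token =>
        if decide (4 ≤ PySem.Str.len token) && ! PySem.Set.contains stopwords token then
          PySem.Set.add terms token
        else terms) terms) terms)
    PySem.Set.empty

-- ===== PORT B =====
-- B's separator test: ch in "@/-_." or ch.isspace()
def pvIsSep (c : Char) : Bool :=
  c == '@' || c == '/' || c == '-' || c == '_' || c == '.' || PySem.Chars.isspace c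

-- literal transliteration of Source B: per candidate string, one scan over the casefolded
-- characters plus a trailing ' ' flush; the running token is a List Char grown at the end
def build_vendor_terms_alt (technologies : List (List (String × List String))) : List String :=
  let stopwords : PySem.Set String := PySem.Set.ofList
    ["ai", "sdk", "agent", "agents", "browser", "use", "tool", "tools", "runtime", "open", "source"]
  technologies.foldl (fun terms row =>
    (PySem.Dict.getD ⟨row⟩ "repo_names" [] ++ PySem.Dict.getD ⟨row⟩ "aliases" []).foldl
      (fun terms text =>
        (((PySem.Str.lower text).toList ++ [' ']).foldl
          (fun st ch =>
            if pvIsSep ch then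
              (if decide (4 ≤ st.2.length) && ! PySem.Set.contains stopwords (String.ofList st.2)
                then PySem.Set.add st.1 (String.ofList st.2) else st.1, ([] : List Char))
            else (st.1, st.2 ++ [ch]))
          (terms, ([] : List Char))).1)
      terms)
    PySem.Set.empty

-- ===== PRECONDITION & SPEC =====
def Spec_build_vendor_terms (technologies : List (List (String × List String))) (out : List String) : Prop := out = build_vendor_terms_alt technologies
instance (technologies : List (List (String × List String))) (out : List String) : Decidable (Spec_build_vendor_terms technologies out) := by unfold Spec_build_vendor_terms; infer_instance

-- ===== CLAIM (what is proved, stated in full; the proofs are below) =====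
def Claim_equal_build_vendor_terms : Prop := ∀ (technologies : List (List (String × List String))), Dom_build_vendor_terms technologies → Spec_build_vendor_terms technologies (build_vendor_terms technologies)

-- ===== LEMMAS AND PROOFS =====

theorem pvReplaceGo (o n' : Char) : ∀ (l : List Char) (fuel : Nat) (acc : List Char),
    l.length ≤ fuel →
    PySem.Chars.replace.go [o] [n'] fuel l acc
      = acc.reverse ++ l.map (fun c => if c = o then n' else c) := by
  intro l
  induction l with
  | nil => intro fuel acc _; cases fuel <;> simp [PySem.Chars.replace.go]
  | cons c t ih =>
    intro fuel acc h
    cases fuel with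
    | zero => simp at h
    | succ f =>
      rw [PySem.Chars.replace.go.eq_def]
      by_cases hc : o = c
      · subst hc
        simp only [List.isPrefixOf, BEq.rfl, Bool.true_and, if_true,
          List.length_cons, List.length_nil, Nat.zero_add, List.drop_succ_cons, List.drop_zero,
          List.reverse_cons, List.reverse_nil, List.nil_append, List.map_cons, List.singleton_append]
        rw [ih f (n' :: acc) (by simpa using h)]
        simp
      · have hbc : (o == c) = false := by simp [hc]
        simp only [List.isPrefixOf, hbc, Bool.false_and, List.map_cons,
          if_neg (Ne.symm hc)]
        rw [ih f (c :: acc) (by simpa using h)]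
        simp

theorem pvReplaceSingle (o n' : Char) (u : List Char) :
    PySem.Chars.replace u [o] [n'] = u.map (fun c => if c = o then n' else c) := by
  have := pvReplaceGo o n' u u.length [] le_rfl
  simpa [PySem.Chars.replace] using this

theorem pvSplitGoAcc : ∀ (l cur : List Char) (acc : List (List Char)),
    PySem.Chars.split₀.go l cur acc = acc.reverse ++ PySem.Chars.split₀.go l cur [] := by
  intro l
  induction l with
  | nil =>
    intro cur acc
    by_cases h : cur.isEmpty = true <;> simp [PySem.Chars.split₀.go, h]
  | cons c t ih =>
    intro cur acc
    rw [PySem.Chars.split₀.go.eq_def]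
    conv_rhs => rw [PySem.Chars.split₀.go.eq_def]
    by_cases hs : PySem.Chars.isspace c = true
    · by_cases h : cur.isEmpty = true
      · simp only [hs, h, if_true]
        exact ih [] acc
      · simp only [hs, h, if_true, Bool.false_eq_true, if_false]
        rw [ih [] (cur.reverse :: acc), ih [] [cur.reverse]]
        simp
    · simp only [hs, Bool.false_eq_true, if_false]
      exact ih (c :: cur) acc

theorem pvSplitGoAppend : ∀ (u v cur : List Char),
    PySem.Chars.split₀.go (u ++ ' ' :: v) cur []
      = PySem.Chars.split₀.go u cur [] ++ PySem.Chars.split₀.go v [] [] := by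
  intro u
  induction u with
  | nil =>
    intro v cur
    simp only [List.nil_append]
    rw [PySem.Chars.split₀.go.eq_def]
    conv_rhs => rw [PySem.Chars.split₀.go.eq_def]
    have hsp : PySem.Chars.isspace ' ' = true := by decide
    by_cases h : cur.isEmpty = true
    · simp [hsp, h]
    · simp only [hsp, h, if_true, Bool.false_eq_true, if_false]
      rw [pvSplitGoAcc v [] [cur.reverse]]
  | cons c t ih =>
    intro v cur
    rw [List.cons_append, PySem.Chars.split₀.go.eq_def]
    conv_rhs => rw [PySem.Chars.split₀.go.eq_def]
    by_cases hs : PySem.Chars.isspace c = true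
    · by_cases h : cur.isEmpty = true
      · simp only [hs, h, if_true]
        exact ih v []
      · simp only [hs, h, if_true, Bool.false_eq_true, if_false]
        rw [pvSplitGoAcc (t ++ ' ' :: v) [] [cur.reverse], pvSplitGoAcc t [] [cur.reverse], ih v []]
        simp
    · simp only [hs, Bool.false_eq_true, if_false]
      exact ih v (c :: cur)

theorem pvSplitAppendSpace (u v : List Char) :
    PySem.Chars.split₀ (u ++ ' ' :: v) = PySem.Chars.split₀ u ++ PySem.Chars.split₀ v := by
  exact pvSplitGoAppend u v []

theorem pvCharLeNat {a b : Char} : a ≤ b ↔ a.toNat ≤ b.toNat := by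
  rw [Char.le_def, Char.toNat, Char.toNat, UInt32.le_iff_toNat_le]

theorem pvLowerCharIdem (c : Char) :
    PySem.Chars.lowerChar (PySem.Chars.lowerChar c) = PySem.Chars.lowerChar c := by
  simp only [PySem.Chars.lowerChar, PySem.Chars.isupper]
  by_cases h : ('A' ≤ c ∧ c ≤ 'Z')
  · have h65 : 65 ≤ c.toNat := pvCharLeNat.mp h.1
    have h90 : c.toNat ≤ 90 := pvCharLeNat.mp h.2
    have ht : (Char.ofNat (c.toNat + 32)).toNat = c.toNat + 32 := by
      rw [Char.toNat_ofNat, if_pos]; left; omega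
    have hz : Char.toNat 'Z' = 90 := by decide
    have hb : (decide ('A' ≤ c) && decide (c ≤ 'Z')) = true := by simp [h.1, h.2]
    have hb2 : (decide ('A' ≤ Char.ofNat (c.toNat + 32))
        && decide (Char.ofNat (c.toNat + 32) ≤ 'Z')) = false := by
      have hnz : ¬ (Char.ofNat (c.toNat + 32) ≤ 'Z') := by
        intro hx
        have hle := pvCharLeNat.mp hx
        rw [ht, hz] at hle
        omega
      simp [hnz]
    simp [hb, hb2]
  · have hb : (decide ('A' ≤ c) && decide (c ≤ 'Z')) = false := by
      rcases not_and_or.mp h with h1 | h1 <;> simp [h1]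
    simp [hb]

def pvF (c : Char) : Char :=
  let c1 := if c = '@' then ' ' else c
  let c2 := if c1 = '/' then ' ' else c1
  let c3 := if c2 = '-' then ' ' else c2
  let c4 := if c3 = '_' then ' ' else c3
  if c4 = '.' then ' ' else c4

theorem pvCleanEq (s : String) :
    (PySem.Str.replace (PySem.Str.replace (PySem.Str.replace (PySem.Str.replace
      (PySem.Str.replace (PySem.Str.lower s) "@" " ") "/" " ") "-" " ") "_" " ") "." " ").toList
    = (PySem.Chars.lower s.toList).map pvF := by
  have h1 : ("@" : String).toList = ['@'] := rfl
  have h2 : ("/" : String).toList = ['/'] := rfl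
  have h3 : ("-" : String).toList = ['-'] := rfl
  have h4 : ("_" : String).toList = ['_'] := rfl
  have h5 : ("." : String).toList = ['.'] := rfl
  have hsp : (" " : String).toList = [' '] := rfl
  simp only [PySem.Str.toList_replace, PySem.Str.toList_lower, h1, h2, h3, h4, h5, hsp,
    pvReplaceSingle, List.map_map]
  rfl

theorem pvPartSpec : ∀ (l : List Char),
    l = (pvPartitionSlash l).1 ++ '/' :: (pvPartitionSlash l).2 ∨ pvPartitionSlash l = (l, []) := by
  intro l
  induction l with
  | nil => right; rfl
  | cons c t ih =>
    by_cases hc : c = '/'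
    · left; simp [pvPartitionSlash, hc]
    · rcases ih with h | h
      · left; simp only [pvPartitionSlash, if_neg hc]
        conv_lhs => rw [h]
        rw [List.cons_append]
      · right; simp [pvPartitionSlash, hc, h]

theorem pvTokens (s : String) :
    split_vendor_tokens s
      = ((PySem.Chars.split₀ ((PySem.Chars.lower s.toList).map pvF)).map String.ofList).filter
          (fun t => t ≠ "") := by
  simp only [split_vendor_tokens]
  rw [show ∀ t : String, PySem.Str.split₀ t = (PySem.Chars.split₀ t.toList).map String.ofList
      from fun _ => rfl, pvCleanEq]

theorem pvMapId {α : Type} (f : α → α) : ∀ (l : List α), (∀ x ∈ l, f x = x) → l.map f = l := by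
  intro l
  induction l with
  | nil => intro _; rfl
  | cons a t ih =>
    intro h
    rw [List.map_cons, h a (List.mem_cons_self), ih (fun x hx => h x (List.mem_cons_of_mem a hx))]

theorem pvLowerFixed (u w : List Char) (h : ∀ c ∈ u, c ∈ PySem.Chars.lower w) :
    PySem.Chars.lower u = u := by
  apply pvMapId
  intro c hc
  rcases List.mem_map.mp (h c hc) with ⟨d, _, hd⟩
  rw [← hd]
  exact pvLowerCharIdem d

theorem pvTokensPartition (s : String) :
    split_vendor_tokens (String.ofList (pvPartitionSlash (PySem.Str.lower s).toList).1)
      ++ split_vendor_tokens (String.ofList (pvPartitionSlash (PySem.Str.lower s).toList).2)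
    = split_vendor_tokens s := by
  have hls : (PySem.Str.lower s).toList = PySem.Chars.lower s.toList := by simp
  rw [hls]
  rcases pvPartSpec (PySem.Chars.lower s.toList) with h | h
  · set a := (pvPartitionSlash (PySem.Chars.lower s.toList)).1 with ha
    set b := (pvPartitionSlash (PySem.Chars.lower s.toList)).2 with hb
    have hma : ∀ c ∈ a, c ∈ PySem.Chars.lower s.toList := by
      intro c hc; rw [h]; simp [hc]
    have hmb : ∀ c ∈ b, c ∈ PySem.Chars.lower s.toList := by
      intro c hc; rw [h]; simp [hc]
    rw [pvTokens, pvTokens, pvTokens]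
    simp only [String.toList_ofList]
    rw [pvLowerFixed a _ hma, pvLowerFixed b _ hmb]
    conv_rhs => rw [h]
    have hslash : pvF '/' = ' ' := by decide
    rw [List.map_append, List.map_cons, hslash, pvSplitAppendSpace, List.map_append,
      List.filter_append]
  · rw [h]
    have hb : split_vendor_tokens (String.ofList []) = [] := by decide
    rw [hb, List.append_nil, pvTokens, pvTokens]
    simp only [String.toList_ofList]
    rw [PySem.Chars.lower]
    rw [show (PySem.Chars.lower s.toList).map PySem.Chars.lowerChar
        = PySem.Chars.lower (PySem.Chars.lower s.toList) from rfl]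
    rw [pvLowerFixed _ _ (fun c hc => hc)]

theorem pvFoldTok (P : String → Bool) (g : String → List String) (xs : List String)
    (init : PySem.Set String) :
    xs.foldl (fun terms x => (g x).foldl (fun terms token =>
        if P token then PySem.Set.add terms token else terms) terms) init
      = List.foldl PySem.Set.add init ((xs.flatMap g).filter P) := by
  induction xs generalizing init with
  | nil => rfl
  | cons x t ih =>
    simp only [List.foldl_cons, List.flatMap_cons, List.filter_append, List.foldl_append]
    rw [ih]
    congr 1
    rw [List.foldl_filter]

theorem pvRow (P : String → Bool) (row : List (String × List String))
    (init : PySem.Set String) :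
    (PySem.Dict.getD ⟨row⟩ "aliases" []).foldl (fun terms alias_ =>
        (split_vendor_tokens alias_).foldl (fun terms token =>
          if P token then PySem.Set.add terms token else terms) terms)
        ((PySem.Dict.getD ⟨row⟩ "repo_names" []).foldl (fun terms repo_name =>
          [String.ofList (pvPartitionSlash (PySem.Str.lower repo_name).toList).1,
           String.ofList (pvPartitionSlash (PySem.Str.lower repo_name).toList).2].foldl
            (fun terms candidate =>
              (split_vendor_tokens candidate).foldl (fun terms token =>
                if P token then PySem.Set.add terms token else terms) terms) terms) init)
    = List.foldl PySem.Set.add init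
        (((PySem.Dict.getD ⟨row⟩ "repo_names" [] ++ PySem.Dict.getD ⟨row⟩ "aliases" []).flatMap
          (fun candidate => split_vendor_tokens candidate)).filter P) := by
  simp only [List.flatMap_append, List.filter_append, List.foldl_append]
  rw [pvFoldTok P (fun a => split_vendor_tokens a) (PySem.Dict.getD ⟨row⟩ "aliases" [])]
  refine congrFun (congrArg _ ?_) _
  have hfuneq : (fun (terms : PySem.Set String) repo_name =>
      [String.ofList (pvPartitionSlash (PySem.Str.lower repo_name).toList).1,
       String.ofList (pvPartitionSlash (PySem.Str.lower repo_name).toList).2].foldl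
        (fun terms candidate =>
          (split_vendor_tokens candidate).foldl (fun terms token =>
            if P token then PySem.Set.add terms token else terms) terms) terms)
    = (fun (terms : PySem.Set String) repo_name =>
        (split_vendor_tokens (String.ofList (pvPartitionSlash (PySem.Str.lower repo_name).toList).1)
          ++ split_vendor_tokens (String.ofList (pvPartitionSlash (PySem.Str.lower repo_name).toList).2)).foldl
          (fun terms token => if P token then PySem.Set.add terms token else terms) terms) := by
    funext terms rn
    simp only [List.foldl_cons, List.foldl_nil, List.foldl_append]
  rw [hfuneq]
  rw [pvFoldTok P (fun rn =>
    split_vendor_tokens (String.ofList (pvPartitionSlash (PySem.Str.lower rn).toList).1)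
      ++ split_vendor_tokens (String.ofList (pvPartitionSlash (PySem.Str.lower rn).toList).2))
    (PySem.Dict.getD ⟨row⟩ "repo_names" []) init]
  refine congrArg _ (congrArg _ ?_)
  apply List.flatMap_congr
  intro rn _
  exact pvTokensPartition rn

theorem pvMain (P : String → Bool) (tech : List (List (String × List String)))
    (init : PySem.Set String) :
    tech.foldl (fun terms row =>
      (PySem.Dict.getD ⟨row⟩ "aliases" []).foldl (fun terms alias_ =>
        (split_vendor_tokens alias_).foldl (fun terms token =>
          if P token then PySem.Set.add terms token else terms) terms)
        ((PySem.Dict.getD ⟨row⟩ "repo_names" []).foldl (fun terms repo_name =>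
          [String.ofList (pvPartitionSlash (PySem.Str.lower repo_name).toList).1,
           String.ofList (pvPartitionSlash (PySem.Str.lower repo_name).toList).2].foldl
            (fun terms candidate =>
              (split_vendor_tokens candidate).foldl (fun terms token =>
                if P token then PySem.Set.add terms token else terms) terms) terms) terms)) init
    = List.foldl PySem.Set.add init
        (((tech.flatMap (fun row =>
            PySem.Dict.getD ⟨row⟩ "repo_names" [] ++ PySem.Dict.getD ⟨row⟩ "aliases" [])).flatMap
          (fun candidate => split_vendor_tokens candidate)).filter P) := by
  induction tech generalizing init with
  | nil => rfl
  | cons row t ih =>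
    rw [List.foldl_cons, ih]
    simp only [List.flatMap_cons, List.flatMap_append, List.filter_append, List.foldl_append]
    refine congrFun (congrArg _ ?_) _
    have h := pvRow P row init
    simp only [List.flatMap_append, List.filter_append, List.foldl_append] at h
    exact h

-- ===== B-side lemmas: the scanner computes the same filtered token stream =====

-- the A-side token predicate, as a function of the stopword set
def pvP (stop : PySem.Set String) (token : String) : Bool :=
  decide (4 ≤ PySem.Str.len token) && ! PySem.Set.contains stop token

theorem pvF_id (c : Char) (h : pvIsSep c = false) : pvF c = c := by
  simp only [pvIsSep, Bool.or_eq_false_iff, beq_eq_false_iff_ne, ne_eq] at h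
  obtain ⟨⟨⟨⟨⟨h1, h2⟩, h3⟩, h4⟩, h5⟩, _⟩ := h
  simp [pvF, h1, h2, h3, h4, h5]

theorem pvIsspace_pvF (c : Char) : PySem.Chars.isspace (pvF c) = pvIsSep c := by
  by_cases e1 : c = '@'
  · subst e1; decide
  by_cases e2 : c = '/'
  · subst e2; decide
  by_cases e3 : c = '-'
  · subst e3; decide
  by_cases e4 : c = '_'
  · subst e4; decide
  by_cases e5 : c = '.'
  · subst e5; decide
  have hf : pvF c = c := by simp [pvF, e1, e2, e3, e4, e5]
  rw [hf]
  simp [pvIsSep, e1, e2, e3, e4, e5]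

theorem pvPQ (stop : PySem.Set String) (r : List Char) :
    pvP stop (String.ofList r) = (decide (4 ≤ r.length) && ! PySem.Set.contains stop (String.ofList r)) := by
  simp only [pvP, PySem.Str.len_eq, String.toList_ofList]
  congr 1
  simp

-- the scanner over l ++ [' '] equals folding Set.add over the filtered split of l.map pvF,
-- with the partial token r pending (cur stored reversed by split₀.go)
theorem pvGoNil (cur : List Char) :
    PySem.Chars.split₀.go [] cur [] = if cur.isEmpty = true then [] else [cur.reverse] := rfl

theorem pvScanGo (stop : PySem.Set String) : ∀ (l r : List Char) (terms : PySem.Set String),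
    ((l ++ [' ']).foldl
      (fun st ch =>
        if pvIsSep ch then
          (if decide (4 ≤ st.2.length) && ! PySem.Set.contains stop (String.ofList st.2)
            then PySem.Set.add st.1 (String.ofList st.2) else st.1, ([] : List Char))
        else (st.1, st.2 ++ [ch]))
      (terms, r)).1
    = List.foldl PySem.Set.add terms
        (((PySem.Chars.split₀.go (l.map pvF) r.reverse []).map String.ofList).filter (pvP stop)) := by
  intro l
  induction l with
  | nil =>
    intro r terms
    have hsp : pvIsSep ' ' = true := by decide
    simp only [List.nil_append, List.foldl_cons, List.foldl_nil, hsp, if_true, List.map_nil]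
    rw [pvGoNil]
    cases r with
    | nil => simp
    | cons a t =>
      rw [if_neg (by simp : ¬(((a :: t).reverse).isEmpty = true))]
      rw [List.reverse_reverse, List.map_cons, List.map_nil, List.filter_cons, List.filter_nil]
      rw [pvPQ stop (a :: t)]
      cases hq : (decide (4 ≤ (a :: t).length) && ! PySem.Set.contains stop (String.ofList (a :: t))) <;>
        simp [hq]
  | cons c t ih =>
    intro r terms
    rw [List.cons_append, List.foldl_cons, List.map_cons]
    rw [PySem.Chars.split₀.go.eq_def]
    simp only [pvIsspace_pvF]
    by_cases hs : pvIsSep c = true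
    · simp only [hs, if_true]
      cases r with
      | nil =>
        simp only [List.reverse_nil, List.isEmpty_nil, if_true]
        have h0 : (decide (4 ≤ ([] : List Char).length)
            && ! PySem.Set.contains stop (String.ofList [])) = false := rfl
        rw [h0]
        simp only [Bool.false_eq_true, if_false]
        exact ih [] terms
      | cons a u =>
        have hne : ((a :: u).reverse.isEmpty) = false := by simp
        simp only [hne, Bool.false_eq_true, if_false, List.reverse_reverse]
        rw [pvSplitGoAcc (t.map pvF) [] [(a :: u)]]
        simp only [List.reverse_cons, List.reverse_nil, List.nil_append, List.singleton_append,
          List.map_cons, List.filter_cons]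
        rw [pvPQ stop (a :: u)]
        cases hq : (decide (4 ≤ (a :: u).length) && ! PySem.Set.contains stop (String.ofList (a :: u))) with
        | true =>
          simp only [List.foldl_cons]
          exact ih [] (PySem.Set.add terms (String.ofList (a :: u)))
        | false =>
          simp only [Bool.false_eq_true, if_false]
          exact ih [] terms
    · have hs' : pvIsSep c = false := by simpa using hs
      simp only [hs', Bool.false_eq_true, if_false, pvF_id c hs']
      have := ih (r ++ [c]) terms
      rw [List.reverse_append] at this
      simpa using this

-- folding Set.add over concatenated pieces, one fold per list element
theorem pvFoldCat {α : Type} (h : α → List String) : ∀ (xs : List α) (init : PySem.Set String),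
    xs.foldl (fun t x => List.foldl PySem.Set.add t (h x)) init
      = List.foldl PySem.Set.add init (xs.flatMap h) := by
  intro xs
  induction xs with
  | nil => intro init; rfl
  | cons x t ih =>
    intro init
    simp only [List.foldl_cons, List.flatMap_cons, List.foldl_append]
    exact ih _

theorem pvFilterSub {α : Type} (p q : α → Bool) (h : ∀ a, p a = true → q a = true) :
    ∀ l : List α, (l.filter q).filter p = l.filter p := by
  intro l
  induction l with
  | nil => rfl
  | cons a t ih =>
    by_cases hq : q a = true
    · by_cases hp : p a = true <;> simp [List.filter_cons, hq, hp, ih]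
    · have hp : p a = false := by
        cases hhp : p a
        · rfl
        · exact absurd (h a hhp) hq
      simp [List.filter_cons, hq, hp, ih]

theorem pvFilterTokens (stop : PySem.Set String) (s : String) :
    (split_vendor_tokens s).filter (pvP stop)
      = ((PySem.Chars.split₀ ((PySem.Chars.lower s.toList).map pvF)).map String.ofList).filter (pvP stop) := by
  rw [pvTokens]
  apply pvFilterSub
  intro a ha
  simp only [pvP, Bool.and_eq_true, decide_eq_true_eq] at ha
  have hlen := ha.1
  rw [PySem.Str.len_eq] at hlen
  simp only [ne_eq, decide_eq_true_eq]
  intro he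
  rw [he] at hlen
  simp at hlen

theorem pvCollect (stop : PySem.Set String) (text : String) (terms : PySem.Set String) :
    (((PySem.Str.lower text).toList ++ [' ']).foldl
      (fun st ch =>
        if pvIsSep ch then
          (if decide (4 ≤ st.2.length) && ! PySem.Set.contains stop (String.ofList st.2)
            then PySem.Set.add st.1 (String.ofList st.2) else st.1, ([] : List Char))
        else (st.1, st.2 ++ [ch]))
      (terms, ([] : List Char))).1
    = List.foldl PySem.Set.add terms ((split_vendor_tokens text).filter (pvP stop)) := by
  rw [pvScanGo stop ((PySem.Str.lower text).toList) [] terms, pvFilterTokens]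
  simp [PySem.Chars.split₀]

theorem pvBMain (stop : PySem.Set String) (tech : List (List (String × List String)))
    (init : PySem.Set String) :
    tech.foldl (fun terms row =>
      (PySem.Dict.getD ⟨row⟩ "repo_names" [] ++ PySem.Dict.getD ⟨row⟩ "aliases" []).foldl
        (fun terms text =>
          (((PySem.Str.lower text).toList ++ [' ']).foldl
            (fun st ch =>
              if pvIsSep ch then
                (if decide (4 ≤ st.2.length) && ! PySem.Set.contains stop (String.ofList st.2)
                  then PySem.Set.add st.1 (String.ofList st.2) else st.1, ([] : List Char))
              else (st.1, st.2 ++ [ch]))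
            (terms, ([] : List Char))).1)
        terms) init
    = List.foldl PySem.Set.add init
        (((tech.flatMap (fun row =>
            PySem.Dict.getD ⟨row⟩ "repo_names" [] ++ PySem.Dict.getD ⟨row⟩ "aliases" [])).flatMap
          (fun candidate => split_vendor_tokens candidate)).filter (pvP stop)) := by
  have hrow : ∀ (row : List (String × List String)) (terms : PySem.Set String),
      (PySem.Dict.getD ⟨row⟩ "repo_names" [] ++ PySem.Dict.getD ⟨row⟩ "aliases" []).foldl
        (fun terms text =>
          (((PySem.Str.lower text).toList ++ [' ']).foldl
            (fun st ch =>
              if pvIsSep ch then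
                (if decide (4 ≤ st.2.length) && ! PySem.Set.contains stop (String.ofList st.2)
                  then PySem.Set.add st.1 (String.ofList st.2) else st.1, ([] : List Char))
              else (st.1, st.2 ++ [ch]))
            (terms, ([] : List Char))).1)
        terms
      = List.foldl PySem.Set.add terms
          (((PySem.Dict.getD ⟨row⟩ "repo_names" [] ++ PySem.Dict.getD ⟨row⟩ "aliases" []).flatMap
            (fun text => (split_vendor_tokens text).filter (pvP stop)))) := by
    intro row terms
    rw [← pvFoldCat (fun text => (split_vendor_tokens text).filter (pvP stop))]
    apply List.foldl_ext
    intro t x _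
    exact pvCollect stop x t
  induction tech generalizing init with
  | nil => rfl
  | cons row t ih =>
    rw [List.foldl_cons, hrow row init, ih]
    simp only [List.flatMap_cons, List.flatMap_append, List.filter_append, List.foldl_append,
      ← List.filter_flatMap]

-- ===== VERDICT (by name: the statement is the Claim_ definition above) =====
theorem build_vendor_terms_spec : Claim_equal_build_vendor_terms := by
  intro tech _
  show build_vendor_terms tech = build_vendor_terms_alt tech
  exact (pvMain (fun token => decide (4 ≤ PySem.Str.len token) && ! PySem.Set.contains
      (PySem.Set.ofList ["ai", "sdk", "agent", "agents", "browser", "use", "tool", "tools",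
        "runtime", "open", "source"]) token) tech PySem.Set.empty).trans
    (pvBMain (PySem.Set.ofList ["ai", "sdk", "agent", "agents", "browser", "use", "tool",
      "tools", "runtime", "open", "source"]) tech PySem.Set.empty).symm
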